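-- pv_equiv track=rewrite | github.com/FoxryanH/federated-contribution-evaluation | 6.interpretability_analysis/build_subjective_interpretability_table.py | ordered_categories
-- ===== SOURCE A (Python) =====
-- PREFERRED_CATEGORY_ORDER = ["clean", "noise20", "noise40", "noise60", "iid_shared_distribution"]
--
-- def ordered_categories(client_summaries):
--     encountered = []
--     for item in client_summaries:
--         category = item.get("client_category", "unknown")
--         if category not in encountered:
--             encountered.append(category)
--
--     ordered = [category for category in PREFERRED_CATEGORY_ORDER if category in encountered]
--     ordered.extend([category for category in encountered if category not in ordered])
--     return ordered
-- ===== SOURCE B (Python) =====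
-- PREFERRED_CATEGORY_ORDER = ["clean", "noise20", "noise40", "noise60", "iid_shared_distribution"]
--
-- def ordered_categories(client_summaries):
--     rank = {c: i for i, c in enumerate(PREFERRED_CATEGORY_ORDER)}
--     key = {}
--     for item in client_summaries:
--         c = item.get("client_category", "unknown")
--         if c not in key:
--             key[c] = rank.get(c, len(PREFERRED_CATEGORY_ORDER) + len(key))
--     return sorted(key, key=lambda c: key[c])
-- ===== Notes on version B (the rewrite author's own statement) =====
-- stated objective: alternative
-- what changed: Replaces A's two filter comprehensions over the deduplicated categories with a rank table built once (preferred index, or preferred-length + first-seen position for others), a dict-based dedup, and a single sorted() call by that key.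
import Mathlib
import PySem

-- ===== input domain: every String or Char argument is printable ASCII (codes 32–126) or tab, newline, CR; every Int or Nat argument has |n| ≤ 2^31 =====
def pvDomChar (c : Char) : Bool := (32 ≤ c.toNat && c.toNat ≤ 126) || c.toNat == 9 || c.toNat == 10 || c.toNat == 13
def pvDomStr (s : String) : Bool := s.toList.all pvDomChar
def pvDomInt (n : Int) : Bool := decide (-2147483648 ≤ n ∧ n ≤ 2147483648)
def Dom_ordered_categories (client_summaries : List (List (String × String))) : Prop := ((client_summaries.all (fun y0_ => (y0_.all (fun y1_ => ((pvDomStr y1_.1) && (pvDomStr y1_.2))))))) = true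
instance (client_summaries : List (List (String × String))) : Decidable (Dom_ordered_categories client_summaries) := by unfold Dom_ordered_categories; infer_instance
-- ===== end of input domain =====

-- B replaces A's two filter comprehensions with a rank table and a single stable sort by rank (alternative decomposition, same return value).


-- ===== PORT A =====
def PREFERRED_CATEGORY_ORDER : List String :=
  ["clean", "noise20", "noise40", "noise60", "iid_shared_distribution"]

def ordered_categories (client_summaries : List (List (String × String))) : List String :=
  let encountered := client_summaries.foldl (fun encountered item =>
    let category := (PySem.Dict.mk item).getD "client_category" "unknown"
    if category ∈ encountered then encountered else encountered ++ [category]) []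
  let ordered := PREFERRED_CATEGORY_ORDER.filter (fun category => decide (category ∈ encountered))
  ordered ++ encountered.filter (fun category => decide (category ∉ ordered))

-- ===== PORT B =====
-- B-side helper: the dict comprehension {c: i for i, c in enumerate(PREFERRED_CATEGORY_ORDER)}
def pvRank : PySem.Dict String Int :=
  (PySem.List.enumerate PREFERRED_CATEGORY_ORDER 0).foldl (fun d p => d.insert p.2 p.1) PySem.Dict.empty

def ordered_categories_alt (client_summaries : List (List (String × String))) : List String :=
  let key := client_summaries.foldl (fun d item =>
    let c := (PySem.Dict.mk item).getD "client_category" "unknown"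
    if d.contains c then d
    else d.insert c (pvRank.getD c (PySem.List.len PREFERRED_CATEGORY_ORDER + d.size))) PySem.Dict.empty
  -- sorted(key, key=lambda c: key[c]): every element of key.keys is a key of `key`,
  -- so the Python lookup key[c] never raises and getD with any default is exact here
  PySem.List.sorted key.keys (fun c => key.getD c 0) false

-- ===== PRECONDITION & SPEC =====
def Spec_ordered_categories (client_summaries : List (List (String × String))) (out : List String) : Prop := out = ordered_categories_alt client_summaries
instance (client_summaries : List (List (String × String))) (out : List String) : Decidable (Spec_ordered_categories client_summaries out) := by unfold Spec_ordered_categories; infer_instance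

-- ===== CLAIM (what is proved, stated in full; the proofs are below) =====
def Claim_equal_ordered_categories : Prop := ∀ (client_summaries : List (List (String × String))), Dom_ordered_categories client_summaries → Spec_ordered_categories client_summaries (ordered_categories client_summaries)

-- ===== LEMMAS AND PROOFS =====

-- the key B stores for a category c, expressed over A's encounter list enc
def pvKval (enc : List String) (c : String) : Int :=
  if c ∈ PREFERRED_CATEGORY_ORDER then ((PREFERRED_CATEGORY_ORDER.idxOf c : Nat) : Int)
  else (PREFERRED_CATEGORY_ORDER.length : Int) + (enc.idxOf c : Nat)

theorem pvRank_getD (c : String) (x : Int) :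
    pvRank.getD c x = if c ∈ PREFERRED_CATEGORY_ORDER then ((PREFERRED_CATEGORY_ORDER.idxOf c : Nat) : Int) else x := by
  by_cases h : c ∈ PREFERRED_CATEGORY_ORDER
  · simp only [if_pos h]
    simp only [PREFERRED_CATEGORY_ORDER, List.mem_cons, List.not_mem_nil, or_false] at h
    rcases h with h | h | h | h | h <;> subst h <;>
      rw [PySem.Dict.getD_eq_get?_getD] <;> rfl
  · have hk : pvRank.keys = PREFERRED_CATEGORY_ORDER := by rfl
    have hn : pvRank.get? c = none := by
      rw [PySem.Dict.get?_eq_none_iff_not_mem_keys, hk]; exact h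
    rw [if_neg h, PySem.Dict.getD_eq_get?_getD, hn]; rfl

-- lockstep invariant of A's dedup loop and B's key-building loop
theorem pv_loop (css : List (List (String × String))) (enc : List String) (d : PySem.Dict String Int)
    (h1 : d.keys = enc) (h2 : enc.Nodup) (h3 : ∀ c ∈ enc, d.getD c 0 = pvKval enc c) :
    (css.foldl (fun d item =>
      let c := (PySem.Dict.mk item).getD "client_category" "unknown"
      if d.contains c then d
      else d.insert c (pvRank.getD c (PySem.List.len PREFERRED_CATEGORY_ORDER + d.size))) d).keys =
    (css.foldl (fun encountered item =>
      let category := (PySem.Dict.mk item).getD "client_category" "unknown"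
      if category ∈ encountered then encountered else encountered ++ [category]) enc) ∧
    (css.foldl (fun encountered item =>
      let category := (PySem.Dict.mk item).getD "client_category" "unknown"
      if category ∈ encountered then encountered else encountered ++ [category]) enc).Nodup ∧
    ∀ c ∈ (css.foldl (fun encountered item =>
      let category := (PySem.Dict.mk item).getD "client_category" "unknown"
      if category ∈ encountered then encountered else encountered ++ [category]) enc),
      (css.foldl (fun d item =>
        let c := (PySem.Dict.mk item).getD "client_category" "unknown"
        if d.contains c then d
        else d.insert c (pvRank.getD c (PySem.List.len PREFERRED_CATEGORY_ORDER + d.size))) d).getD c 0 =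
      pvKval (css.foldl (fun encountered item =>
        let category := (PySem.Dict.mk item).getD "client_category" "unknown"
        if category ∈ encountered then encountered else encountered ++ [category]) enc) c := by
  induction css generalizing enc d with
  | nil => exact ⟨h1, h2, h3⟩
  | cons item css ih =>
    by_cases hc : (PySem.Dict.mk item).getD "client_category" "unknown" ∈ enc
    · have hcont : d.contains ((PySem.Dict.mk item).getD "client_category" "unknown") = true :=
        (PySem.Dict.contains_iff_mem_keys d _).mpr (h1 ▸ hc)
      simp only [List.foldl_cons, hcont, hc, if_true]
      exact ih enc d h1 h2 h3
    · have hcont : d.contains ((PySem.Dict.mk item).getD "client_category" "unknown") = false := by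
        rw [Bool.eq_false_iff]
        intro hcon
        exact hc (h1 ▸ (PySem.Dict.contains_iff_mem_keys d _).mp hcon)
      have hsize : (d.size : Int) = (enc.length : Int) := by
        have hkl : d.keys.length = enc.length := by rw [h1]
        simpa [PySem.Dict.keys, PySem.Dict.size] using hkl
      simp only [List.foldl_cons, hcont, hc, if_false, Bool.false_eq_true]
      apply ih
      · rw [PySem.Dict.keys_insert_of_not_contains d _ hcont, h1]
      · rw [List.nodup_append]
        refine ⟨h2, List.nodup_singleton _, ?_⟩
        intro a ha b hb
        rw [List.mem_singleton] at hb
        subst hb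
        exact fun he => hc (he ▸ ha)
      · intro c' hc'
        rcases List.mem_append.mp hc' with hmem | hmem
        · have hne : c' ≠ (PySem.Dict.mk item).getD "client_category" "unknown" :=
            fun he => hc (he ▸ hmem)
          rw [PySem.Dict.getD_insert_of_ne d _ _ hne, h3 c' hmem]
          unfold pvKval
          by_cases hp : c' ∈ PREFERRED_CATEGORY_ORDER
          · simp [hp]
          · simp [hp, List.idxOf_append_of_mem hmem]
        · simp only [List.mem_singleton] at hmem
          subst hmem
          rw [PySem.Dict.getD_insert_self, pvRank_getD]
          unfold pvKval
          by_cases hp : (PySem.Dict.mk item).getD "client_category" "unknown" ∈ PREFERRED_CATEGORY_ORDER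
          · simp [hp]
          · have hidx : (enc ++ [(PySem.Dict.mk item).getD "client_category" "unknown"]).idxOf
                ((PySem.Dict.mk item).getD "client_category" "unknown") = enc.length := by
              rw [List.idxOf_append]
              simp [List.idxOf_eq_length_iff.mpr hc]
            rw [if_neg hp, if_neg hp, hidx, hsize, PySem.List.len_eq]

theorem pv_nodup_pairwise_idxOf (l : List String) (h : l.Nodup) :
    l.Pairwise (fun a b => l.idxOf a < l.idxOf b) := by
  rw [List.pairwise_iff_getElem]
  intro i j hi hj hij
  rw [h.idxOf_getElem, h.idxOf_getElem]
  exact hij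

-- B's sort of the keys, named as A's two filters (strictly increasing keys on a Nodup list)
theorem pv_sorted_eq (enc : List String) (d : PySem.Dict String Int)
    (h2 : enc.Nodup) (h3 : ∀ c ∈ enc, d.getD c 0 = pvKval enc c) :
    PySem.List.sorted enc (fun c => d.getD c 0) =
      PREFERRED_CATEGORY_ORDER.filter (fun c => decide (c ∈ enc)) ++
      enc.filter (fun c => decide (c ∉ PREFERRED_CATEGORY_ORDER)) := by
  have hPnd : PREFERRED_CATEGORY_ORDER.Nodup := by decide
  apply PySem.List.sorted_eq_of_perm_of_pairwise_lt
  · have hperm1 : (PREFERRED_CATEGORY_ORDER.filter (fun c => decide (c ∈ enc))).Perm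
        (enc.filter (fun c => decide (c ∈ PREFERRED_CATEGORY_ORDER))) := by
      refine (List.perm_ext_iff_of_nodup (hPnd.filter _) (h2.filter _)).mpr ?_
      intro x
      simp only [List.mem_filter, decide_eq_true_eq]
      tauto
    have hfneg : enc.filter (fun c => decide (c ∉ PREFERRED_CATEGORY_ORDER)) =
        enc.filter (fun c => !(decide (c ∈ PREFERRED_CATEGORY_ORDER))) := by
      simp
    refine List.Perm.trans ?_ (List.filter_append_perm (fun c => decide (c ∈ PREFERRED_CATEGORY_ORDER)) enc)
    rw [hfneg]
    exact hperm1.append_right _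
  · rw [List.pairwise_append]
    refine ⟨?_, ?_, ?_⟩
    · refine ((pv_nodup_pairwise_idxOf _ hPnd).filter _).imp_of_mem ?_
      intro a b ha hb hr
      rw [List.mem_filter, decide_eq_true_eq] at ha hb
      show d.getD a 0 < d.getD b 0
      rw [h3 a ha.2, h3 b hb.2, pvKval, pvKval, if_pos ha.1, if_pos hb.1]
      exact_mod_cast hr
    · refine ((pv_nodup_pairwise_idxOf _ h2).filter _).imp_of_mem ?_
      intro a b ha hb hr
      rw [List.mem_filter, decide_eq_true_eq] at ha hb
      show d.getD a 0 < d.getD b 0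
      rw [h3 a ha.1, h3 b hb.1, pvKval, pvKval, if_neg ha.2, if_neg hb.2]
      have := Int.ofNat_lt.mpr hr
      omega
    · intro a ha b hb
      rw [List.mem_filter, decide_eq_true_eq] at ha hb
      show d.getD a 0 < d.getD b 0
      rw [h3 a ha.2, h3 b hb.1, pvKval, pvKval, if_pos ha.1, if_neg hb.2]
      have h5 : List.idxOf a PREFERRED_CATEGORY_ORDER < PREFERRED_CATEGORY_ORDER.length :=
        List.idxOf_lt_length_of_mem ha.1
      omega

theorem pv_main (css : List (List (String × String))) :
    ordered_categories css = ordered_categories_alt css := by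
  obtain ⟨h1, h2, h3⟩ := pv_loop css [] PySem.Dict.empty rfl List.nodup_nil
    (fun c hc => absurd hc List.not_mem_nil)
  unfold ordered_categories ordered_categories_alt
  simp only []
  rw [h1, pv_sorted_eq _ _ h2 h3]
  congr 1
  refine List.filter_congr ?_
  intro c hcmem
  simp only [decide_eq_decide, List.mem_filter, decide_eq_true_eq]
  constructor
  · intro hnot hp
    exact hnot ⟨hp, hcmem⟩
  · intro hnot hand
    exact hnot hand.1

-- ===== VERDICT (by name: the statement is the Claim_ definition above) =====
theorem ordered_categories_spec : Claim_equal_ordered_categories := by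
  intro client_summaries _hdom
  unfold Spec_ordered_categories
  exact pv_main client_summaries
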